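-- pv_equiv track=rewrite | github.com/craigontour/AdventOfCode | 2019/day4.py | check_facts2
-- ===== SOURCE A (Python) =====
-- def check_facts2(n):
--   s = str(n)
--   asc = True
--   dups = [0 for a in range(10)]
--
--   for i in range(len(s)):
--     # this works because numbers are ordered
--     dups[int(s[i])] += 1
--
--     # if i < len(s)-1:
--     #   if s[i] > s[i+1]:
--     #     asc = False
--     #     break
--
--   for i in range(len(s)-1):
--     if s[i] > s[i+1]:
--       asc = False
--       break
--
--   return asc and (2 in dups)
-- ===== SOURCE B (Python) =====
-- def check_facts2(n):
--   # Idiomatic rewrite: digit list + adjacent-pair scan; detects a run of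
--   # length exactly 2 in one pass instead of a 10-slot histogram (valid
--   # because when the digits are ascending, run lengths equal global counts,
--   # and when they are not ascending the result is False anyway).
--   digits = [int(c) for c in str(n)]
--   if any(a > b for a, b in zip(digits, digits[1:])):
--     return False
--   run = 1
--   has_pair = False
--   for a, b in zip(digits, digits[1:]):
--     if a == b:
--       run += 1
--     else:
--       has_pair = has_pair or run == 2
--       run = 1
--   return has_pair or run == 2
-- ===== Notes on version B (the rewrite author's own statement) =====
-- stated objective: idiomatic
-- what changed: Replaces the 10-slot frequency histogram plus separate index loop with a digit list, an adjacent-pair ascending test, and a single run-length scan that detects a run of exactly two (equal to the global count because the digits are ascending).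
import Mathlib
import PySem

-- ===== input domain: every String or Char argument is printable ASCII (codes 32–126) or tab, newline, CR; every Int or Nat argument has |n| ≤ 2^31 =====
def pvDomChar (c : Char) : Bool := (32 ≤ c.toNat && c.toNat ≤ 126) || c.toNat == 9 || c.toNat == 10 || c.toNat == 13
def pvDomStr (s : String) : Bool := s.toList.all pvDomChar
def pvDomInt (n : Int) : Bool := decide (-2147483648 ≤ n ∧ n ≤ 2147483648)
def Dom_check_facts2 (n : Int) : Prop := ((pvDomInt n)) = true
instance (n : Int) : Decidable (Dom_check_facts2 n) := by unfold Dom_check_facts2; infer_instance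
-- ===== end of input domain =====

-- B replaces A's 10-slot digit histogram + separate index-based ascending loop by a
-- digit list, an adjacent-pair ascending test and a single run-length scan (idiomatic; same cost).

-- ===== PORT A =====
-- A's second loop: for i in range(len(s)-1): if s[i] > s[i+1]: asc = False; break
-- (break = stop recursing and return False; asc is never read before the return).
def pvAscLoop (s : List Char) (i : Nat) : Bool :=
  if h : i + 1 < s.length then
    if s[i+1] < s[i]'(by omega) then false else pvAscLoop s (i + 1)
  else true
termination_by s.length - i

def check_facts2 (n : Int) : Bool :=
  let s := (PySem.Int.toStr n).toList
  -- dups[int(s[i])] += 1 over i in range(len(s)); the index int(s[i]) is c.toNat - 48,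
  -- exact for the digit characters Pre_ guarantees (n ≥ 0 ⇒ str(n) is all digits)
  let dups := (List.range s.length).foldl
    (fun (d : List Int) i =>
      d.set ((s.getD i ' ').toNat - 48) (d.getD ((s.getD i ' ').toNat - 48) 0 + 1))
    (List.replicate 10 0)
  let asc := pvAscLoop s 0
  asc && dups.contains 2

-- ===== PORT B =====
-- int(c) for a single digit character c ('0'..'9'); exact there (Pre_ guarantees
-- every character of str(n) is a digit, since n ≥ 0).
def pvDigit (c : Char) : Int := (c.toNat : Int) - 48

def check_facts2_alt (n : Int) : Bool :=
  let digits := (PySem.Int.toStr n).toList.map pvDigit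
  if (digits.zip digits.tail).any (fun p => p.2 < p.1) then false
  else
    let st := (digits.zip digits.tail).foldl
      (fun (st : Int × Bool) p =>
        if p.1 == p.2 then (st.1 + 1, st.2) else ((1 : Int), st.2 || (st.1 == 2)))
      ((1 : Int), false)
    st.2 || (st.1 == 2)

-- ===== PRECONDITION & SPEC =====
-- Pre_ excludes exactly n < 0, where both A and B raise ValueError (int('-')).
def Pre_check_facts2 (n : Int) : Prop := 0 ≤ n
instance (n : Int) : Decidable (Pre_check_facts2 n) := by unfold Pre_check_facts2; infer_instance
def pvWitness_check_facts2 : Int := (122345)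

def Spec_check_facts2 (n : Int) (out : Bool) : Prop := out = check_facts2_alt n
instance (n : Int) (out : Bool) : Decidable (Spec_check_facts2 n out) := by unfold Spec_check_facts2; infer_instance

-- ===== CLAIM (what is proved, stated in full; the proofs are below) =====
def Claim_equal_check_facts2 : Prop := ∀ (n : Int), Dom_check_facts2 n → Pre_check_facts2 n → Spec_check_facts2 n (check_facts2 n)

-- ===== LEMMAS AND PROOFS =====

-- adjacent-non-descending test on the character list (what A's asc loop computes)
def pvCharAdj : List Char → Bool
  | a :: b :: t => (!(b < a)) && pvCharAdj (b :: t)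
  | _ => true

-- B's run-length scan, written as a recursion for the proof
def pvRunScan (prev run : Int) (hp : Bool) : List Int → Bool
  | [] => hp || (run == 2)
  | b :: t => if prev == b then pvRunScan b (run + 1) hp t
              else pvRunScan b 1 (hp || (run == 2)) t

theorem pvChar_lt_iff (a b : Char) : a < b ↔ a.toNat < b.toNat := by
  rw [Char.lt_def, UInt32.lt_iff_toNat_lt]; rfl

-- every character written by Nat.toDigits (base 10) is a decimal digit
theorem pv_toDigitsCore_digits (f : Nat) : ∀ (m : Nat) (ds : List Char),
    (∀ c ∈ ds, 48 ≤ c.toNat ∧ c.toNat ≤ 57) →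
    ∀ c ∈ Nat.toDigitsCore 10 f m ds, 48 ≤ c.toNat ∧ c.toNat ≤ 57 := by
  induction f with
  | zero => intro m ds h; simpa [Nat.toDigitsCore] using h
  | succ f ih =>
    intro m ds h c hc
    have hlt : m % 10 < 10 := Nat.mod_lt _ (by omega)
    have hdigit : 48 ≤ (Nat.digitChar (m % 10)).toNat ∧ (Nat.digitChar (m % 10)).toNat ≤ 57 := by
      interval_cases h : m % 10 <;> decide
    simp only [Nat.toDigitsCore] at hc
    split at hc
    · rcases List.mem_cons.mp hc with rfl | hm
      · exact hdigit
      · exact h c hm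
    · refine ih _ _ ?_ c hc
      intro c' hc'
      rcases List.mem_cons.mp hc' with rfl | hm
      · exact hdigit
      · exact h c' hm

-- every character of str(n), n ≥ 0, is a decimal digit
theorem pv_toChars_digits (n : Int) (hn : 0 ≤ n) :
    ∀ c ∈ PySem.Int.toChars n, 48 ≤ c.toNat ∧ c.toNat ≤ 57 := by
  unfold PySem.Int.toChars
  rw [if_neg (by omega)]
  exact pv_toDigitsCore_digits _ _ _ (by simp)

theorem pvAscLoop_eq (s : List Char) (i : Nat) : pvAscLoop s i = pvCharAdj (s.drop i) := by
  fun_induction pvAscLoop s i with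
  | case1 i h hlt =>
    rw [List.drop_eq_getElem_cons (by omega : i < s.length),
        List.drop_eq_getElem_cons (by omega : i + 1 < s.length)]
    simp [pvCharAdj, hlt]
  | case2 i h hlt ih =>
    rw [List.drop_eq_getElem_cons (by omega : i < s.length),
        List.drop_eq_getElem_cons (by omega : i + 1 < s.length)]
    rw [List.drop_eq_getElem_cons (by omega : i + 1 < s.length)] at ih
    simp only [pvCharAdj]
    simp [hlt, ih]
  | case3 i h =>
    rcases Nat.lt_or_ge i s.length with h2 | h2
    · rw [List.drop_eq_getElem_cons h2, List.drop_eq_nil_iff.mpr (by omega)]; rfl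
    · rw [List.drop_eq_nil_iff.mpr (by omega)]; rfl

-- B's descending-pair test is the negation of A's adjacency test
theorem pvAny_desc (s : List Char) :
    (((s.map pvDigit).zip (s.map pvDigit).tail).any (fun p => p.2 < p.1)) = !(pvCharAdj s) := by
  induction s with
  | nil => rfl
  | cons a t ih =>
    cases t with
    | nil => rfl
    | cons b t' =>
      simp only [List.map_cons, List.tail_cons, List.zip_cons_cons, List.any_cons, pvCharAdj] at ih ⊢
      rw [ih]
      have : (pvDigit b < pvDigit a) ↔ (b < a) := by
        rw [pvChar_lt_iff]; simp only [pvDigit]; omega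
      by_cases hba : b < a
      · simp [hba, this.mpr hba]
      · have : ¬ (pvDigit b < pvDigit a) := fun h => hba (this.mp h)
        simp [hba, this]

theorem pvCharAdj_pairwise (s : List Char) (h : pvCharAdj s = true) :
    List.Pairwise (· ≤ ·) (s.map pvDigit) := by
  rw [← List.isChain_iff_pairwise, List.isChain_map]
  induction s with
  | nil => exact .nil
  | cons a t ih =>
    cases t with
    | nil => exact .singleton _
    | cons b t' =>
      simp only [pvCharAdj, Bool.and_eq_true, Bool.not_eq_eq_eq_not, Bool.not_true] at h
      rw [List.isChain_cons_cons]
      refine ⟨?_, ih h.2⟩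
      have : ¬ (b < a) := by simpa using h.1
      rw [pvChar_lt_iff] at this
      simp only [pvDigit]; omega

-- A's index loop over range(len(s)) is a fold over the characters themselves
theorem pvFoldl_range_getD (g : List Int → Char → List Int) (s : List Char) (init : List Int) :
    (List.range s.length).foldl (fun d i => g d (s.getD i ' ')) init = s.foldl g init := by
  induction s using List.reverseRecOn generalizing init with
  | nil => rfl
  | append_singleton t a ih =>
    rw [List.length_append, List.length_singleton, List.range_succ, List.foldl_append,
        List.foldl_append]
    have h1 : ∀ (acc : List Int) (i : Nat), i ∈ List.range t.length →
        g acc ((t ++ [a]).getD i ' ') = g acc (t.getD i ' ') := by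
      intro acc i hi
      rw [List.mem_range] at hi
      simp [List.getD, List.getElem?_append_left hi]
    rw [PySem.List.foldl_congr_mem _ _ _ _ h1, ih]
    simp [List.getD]

-- A's histogram is the per-digit count of the string
theorem pvCounts (s : List Char) (hd : ∀ c ∈ s, 48 ≤ c.toNat ∧ c.toNat ≤ 57) :
    s.foldl (fun (d : List Int) c =>
        d.set (c.toNat - 48) (d.getD (c.toNat - 48) 0 + 1)) (List.replicate 10 0)
      = (List.range 10).map (fun v => (s.countP (fun c => c.toNat - 48 == v) : Int)) := by
  induction s using List.reverseRecOn with
  | nil =>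
    apply List.ext_getElem (by simp)
    intro i h1 h2
    simp
  | append_singleton t a ih =>
    have hdt : ∀ c ∈ t, 48 ≤ c.toNat ∧ c.toNat ≤ 57 := fun c hc => hd c (by simp [hc])
    have ha : 48 ≤ a.toNat ∧ a.toNat ≤ 57 := hd a (by simp)
    rw [List.foldl_append, ih hdt]
    apply List.ext_getElem (by simp)
    intro j h1 h2
    simp only [List.foldl_cons, List.foldl_nil]
    rw [List.getElem_set]
    have hidx : a.toNat - 48 < 10 := by omega
    by_cases hj : a.toNat - 48 = j
    · rw [if_pos hj]
      have : ((List.range 10).map (fun v => ((t.countP (fun c => c.toNat - 48 == v)) : Int))).getD (a.toNat - 48) 0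
           = (t.countP (fun c => c.toNat - 48 == (a.toNat - 48)) : Int) := by
        rw [List.getD_eq_getElem?_getD]
        rw [List.getElem?_eq_getElem (by simpa using hidx)]
        simp
      rw [this]
      rw [List.getElem_map, List.getElem_range]
      rw [List.countP_append]
      have : List.countP (fun c => c.toNat - 48 == j) [a] = 1 := by
        simp [hj]
      rw [this, hj]
      push_cast
      ring
    · rw [if_neg hj]
      rw [List.getElem_map, List.getElem_map, List.getElem_range, List.countP_append]
      have : List.countP (fun c => c.toNat - 48 == j) [a] = 0 := by
        simp [hj]
      rw [this]
      simp

theorem pvBeq_cast (r : Nat) : (((r : Int)) == 2) = (r == 2) := by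
  cases h : r == 2
  · simp_all; omega
  · simp_all

-- B's zip-fold is the recursive run scan
theorem pvZipFold_runScan (t : List Int) : ∀ (prev run : Int) (hp : Bool),
    (let z := ((prev :: t).zip t);
     let st := z.foldl (fun (st : Int × Bool) p =>
        if p.1 == p.2 then (st.1 + 1, st.2) else ((1 : Int), st.2 || (st.1 == 2))) ((run : Int), hp);
     st.2 || (st.1 == 2)) = pvRunScan prev run hp t := by
  induction t with
  | nil => intro prev run hp; rfl
  | cons b t' ih =>
    intro prev run hp
    simp only [List.zip_cons_cons, List.foldl_cons, pvRunScan]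
    by_cases h : prev = b
    · simp only [h, BEq.rfl, if_true]
      exact ih b (run + 1) hp
    · have hb : (prev == b) = false := by simp [h]
      simp only [hb, if_false, Bool.false_eq_true]
      exact ih b 1 (hp || (run == 2))

-- on a sorted list, the run scan finds a value whose global count is exactly 2
theorem pvRunScan_eq (t : List Int) : ∀ (prev : Int) (r : Nat) (hp : Bool), 1 ≤ r →
    List.Pairwise (· ≤ ·) (prev :: t) →
    pvRunScan prev (r : Int) hp t
      = (hp || (List.replicate r prev ++ t).any
          (fun v => (List.replicate r prev ++ t).count v == 2)) := by
  induction t with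
  | nil =>
    intro prev r hp hr _
    simp only [pvRunScan, List.append_nil]
    have : (List.replicate r prev).any (fun v => (List.replicate r prev).count v == 2)
        = (r == 2) := by
      cases h : (r == 2)
      · simp only [List.any_eq_false]
        intro v hv
        rw [List.mem_replicate] at hv
        rw [hv.2, List.count_replicate, if_pos (by simp)]
        simp [h]
      · rw [List.any_eq_true]
        refine ⟨prev, ?_, ?_⟩
        · rw [List.mem_replicate]; exact ⟨by omega, rfl⟩
        · rw [List.count_replicate, if_pos (by simp)]; exact h
    rw [this, pvBeq_cast]
  | cons b t' ih =>
    intro prev r hp hr hs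
    rw [List.pairwise_cons] at hs
    obtain ⟨hle, hs'⟩ := hs
    have hpb : prev ≤ b := hle b (by simp)
    by_cases h : prev = b
    · subst h
      simp only [pvRunScan, BEq.rfl, if_true]
      have hcast : (r : Int) + 1 = ((r + 1 : Nat) : Int) := by push_cast; ring
      rw [hcast, ih prev (r + 1) hp (by omega) hs']
      have : List.replicate r prev ++ prev :: t' = List.replicate (r + 1) prev ++ t' := by
        rw [List.replicate_succ', List.append_assoc]; rfl
      rw [this]
    · have hb : (prev == b) = false := by simp [h]
      have hlt : prev < b := lt_of_le_of_ne hpb h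
      have hltall : ∀ v ∈ b :: t', prev < v := by
        intro v hv
        rcases List.mem_cons.mp hv with rfl | hv'
        · exact hlt
        · exact lt_of_lt_of_le hlt (List.rel_of_pairwise_cons hs' hv')
      simp only [pvRunScan, hb, Bool.false_eq_true, if_false]
      have h1 : (1 : Int) = ((1 : Nat) : Int) := rfl
      rw [h1, ih b 1 (hp || ((r : Int) == 2)) (by omega) hs']
      have hL1 : List.replicate 1 b ++ t' = b :: t' := by simp
      rw [hL1]
      set L := List.replicate r prev ++ b :: t' with hL
      have hcnt : ∀ v ∈ b :: t', L.count v = (b :: t').count v := by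
        intro v hv
        rw [hL, List.count_append, List.count_replicate,
            if_neg (by simp; exact (hltall v hv).ne), Nat.zero_add]
      have hcntp : L.count prev = r := by
        rw [hL, List.count_append, List.count_replicate, if_pos (by simp),
            List.count_eq_zero.mpr (fun hm => absurd rfl (hltall prev hm).ne)]
        omega
      have key : (L.any fun v => L.count v == 2)
          = ((r == 2) || ((b :: t').any fun v => (b :: t').count v == 2)) := by
        cases hk : ((r == 2) || ((b :: t').any fun v => (b :: t').count v == 2))
        · simp only [Bool.or_eq_false_iff] at hk
          obtain ⟨hk1, hk2⟩ := hk
          rw [List.any_eq_false] at hk2 ⊢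
          intro v hv
          rcases List.mem_append.mp hv with hv1 | hv2
          · rw [List.mem_replicate] at hv1
            rw [hv1.2, hcntp]
            simpa using hk1
          · rw [hcnt v hv2]
            exact hk2 v hv2
        · rw [Bool.or_eq_true] at hk
          rw [List.any_eq_true]
          rcases hk with hk1 | hk2
          · refine ⟨prev, List.mem_append.mpr (.inl ?_), by rw [hcntp]; exact hk1⟩
            rw [List.mem_replicate]; exact ⟨by omega, rfl⟩
          · rw [List.any_eq_true] at hk2
            obtain ⟨v, hv, hc⟩ := hk2
            exact ⟨v, List.mem_append.mpr (.inr hv), by rw [hcnt v hv]; exact hc⟩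
      rw [key, pvBeq_cast, Bool.or_assoc]

theorem pvCount_map (s : List Char) (w : Int) :
    (s.map pvDigit).count w = s.countP (fun c => pvDigit c == w) := by
  simp [List.count, List.countP_map]; rfl

-- '2 in dups' ↔ 'some digit value occurs exactly twice'
theorem pvContains_eq_any (s : List Char) (hd : ∀ c ∈ s, 48 ≤ c.toNat ∧ c.toNat ≤ 57) :
    (((List.range 10).map (fun v => (s.countP (fun c => c.toNat - 48 == v) : Int))).contains 2)
      = ((s.map pvDigit).any (fun v => (s.map pvDigit).count v == 2)) := by
  have hpred : ∀ (v : Nat), s.countP (fun c => pvDigit c == (v : Int)) = s.countP (fun c => c.toNat - 48 == v) := by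
    intro v
    apply List.countP_congr
    intro c hc
    have h48 := (hd c hc).1
    simp only [pvDigit, beq_iff_eq]
    constructor
    · intro h; omega
    · intro h; omega
  cases hk : (s.map pvDigit).any (fun v => (s.map pvDigit).count v == 2)
  · rw [← Bool.not_eq_true, List.contains_iff_mem, List.mem_map]
    rintro ⟨v, hv, hc⟩
    rw [List.mem_range] at hv
    rw [List.any_eq_false] at hk
    have hvmem : ((v : Int)) ∈ s.map pvDigit := by
      rw [← List.count_pos_iff, pvCount_map, hpred v]
      omega
    have := hk _ hvmem
    rw [pvCount_map, hpred v] at this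
    have h2 : List.countP (fun c => c.toNat - 48 == v) s = 2 := by omega
    rw [h2] at this
    simp at this
  · rw [List.any_eq_true] at hk
    obtain ⟨w, hw, hc⟩ := hk
    rw [List.contains_iff_mem, List.mem_map]
    obtain ⟨c, hcs, rfl⟩ := List.mem_map.mp hw
    have h48 := hd c hcs
    refine ⟨c.toNat - 48, by rw [List.mem_range]; omega, ?_⟩
    rw [pvCount_map] at hc
    have hpd : pvDigit c = ((c.toNat - 48 : Nat) : Int) := by
      simp only [pvDigit]; omega
    rw [hpd, hpred] at hc
    rw [beq_iff_eq] at hc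
    exact_mod_cast hc

-- the whole equivalence, on an arbitrary all-digit character list
theorem pvMain (s : List Char) (hd : ∀ c ∈ s, 48 ≤ c.toNat ∧ c.toNat ≤ 57) :
    (pvAscLoop s 0 &&
      ((List.range s.length).foldl
        (fun (d : List Int) i =>
          d.set ((s.getD i ' ').toNat - 48) (d.getD ((s.getD i ' ').toNat - 48) 0 + 1))
        (List.replicate 10 0)).contains 2)
    = (if ((s.map pvDigit).zip (s.map pvDigit).tail).any (fun p => p.2 < p.1) then false
       else
        (((s.map pvDigit).zip (s.map pvDigit).tail).foldl
          (fun (st : Int × Bool) p =>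
            if p.1 == p.2 then (st.1 + 1, st.2) else ((1 : Int), st.2 || (st.1 == 2)))
          ((1 : Int), false)).2 ||
        ((((s.map pvDigit).zip (s.map pvDigit).tail).foldl
          (fun (st : Int × Bool) p =>
            if p.1 == p.2 then (st.1 + 1, st.2) else ((1 : Int), st.2 || (st.1 == 2)))
          ((1 : Int), false)).1 == 2)) := by
  rw [pvAscLoop_eq s 0, List.drop_zero, pvAny_desc s]
  cases hA : pvCharAdj s
  · simp
  · simp only [Bool.not_true, Bool.false_eq_true, if_false, Bool.true_and]
    rw [pvFoldl_range_getD (fun d c => d.set (c.toNat - 48) (d.getD (c.toNat - 48) 0 + 1)) s]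
    rw [pvCounts s hd, pvContains_eq_any s hd]
    have hpw := pvCharAdj_pairwise s hA
    cases s with
    | nil => simp
    | cons c t =>
      simp only [List.map_cons, List.tail_cons] at hpw ⊢
      rw [pvZipFold_runScan (t.map pvDigit) (pvDigit c) 1 false]
      have h1 : (1 : Int) = ((1 : Nat) : Int) := rfl
      rw [h1, pvRunScan_eq (t.map pvDigit) (pvDigit c) 1 false (le_refl 1) hpw]
      simp [List.replicate]

-- ===== VERDICT (by name: the statement is the Claim_ definition above) =====
theorem check_facts2_spec : Claim_equal_check_facts2 := by
  intro n _ hn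
  unfold Spec_check_facts2 check_facts2 check_facts2_alt
  simp only [PySem.Int.toList_toStr]
  exact pvMain _ (pv_toChars_digits n hn)
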